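-- pv_equiv track=rewrite | github.com/Kamisato520/DataEvolver | scripts/feedback_loop/compare.py | combine_verdict
-- ===== SOURCE A (Python) =====
-- def combine_verdict(source_reports: dict) -> str:
--     verdicts = [report["verdict"] for report in source_reports.values()]
--     if "stop_or_revert" in verdicts:
--         return "stop_or_revert"
--     if "inspect" in verdicts:
--         return "inspect"
--     if "continue" in verdicts:
--         return "continue"
--     return "no_signal"
-- ===== SOURCE B (Python) =====
-- def combine_verdict(source_reports: dict) -> str:
--     priority = {"stop_or_revert": 0, "inspect": 1, "continue": 2}
--     names = ["stop_or_revert", "inspect", "continue"]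
--     best = 3
--     for report in source_reports.values():
--         p = priority.get(report["verdict"], 3)
--         if p < best:
--             best = p
--     return names[best] if best < 3 else "no_signal"
-- ===== Notes on version B (the rewrite author's own statement) =====
-- stated objective: alternative
-- what changed: Replaces three ordered membership scans over a built verdicts list with a single pass that tracks the minimum priority via a table, then maps the best priority back to its name.
import Mathlib
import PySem

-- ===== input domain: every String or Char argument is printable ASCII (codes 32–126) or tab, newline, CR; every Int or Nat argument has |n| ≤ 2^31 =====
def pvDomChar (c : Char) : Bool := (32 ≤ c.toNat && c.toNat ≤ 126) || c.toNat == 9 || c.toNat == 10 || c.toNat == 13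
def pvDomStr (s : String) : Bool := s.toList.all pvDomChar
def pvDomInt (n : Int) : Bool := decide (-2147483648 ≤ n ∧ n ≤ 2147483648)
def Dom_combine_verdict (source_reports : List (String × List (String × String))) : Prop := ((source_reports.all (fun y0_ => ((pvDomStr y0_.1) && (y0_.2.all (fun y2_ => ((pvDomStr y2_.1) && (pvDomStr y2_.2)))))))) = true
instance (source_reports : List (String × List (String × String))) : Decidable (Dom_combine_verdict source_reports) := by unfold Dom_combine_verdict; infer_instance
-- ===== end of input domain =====

-- B replaces A's three ordered membership scans with one pass tracking the minimum priority via a table; same cost, different decomposition.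

-- ===== PORT A =====
-- report["verdict"]: dict lookup; Pre_ guarantees the key exists (otherwise Python A raises KeyError).
def combine_verdict (source_reports : List (String × List (String × String))) : String :=
  let verdicts := source_reports.map (fun kv => (PySem.Dict.mk kv.2).getD "verdict" "")
  if verdicts.contains "stop_or_revert" then "stop_or_revert"
  else if verdicts.contains "inspect" then "inspect"
  else if verdicts.contains "continue" then "continue"
  else "no_signal"

-- ===== PORT B =====
def combine_verdict_alt (source_reports : List (String × List (String × String))) : String :=
  let priority : PySem.Dict String Int := PySem.Dict.mk [("stop_or_revert", 0), ("inspect", 1), ("continue", 2)]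
  let names : List String := ["stop_or_revert", "inspect", "continue"]
  let best : Int := source_reports.foldl
    (fun best kv =>
      let p := priority.getD ((PySem.Dict.mk kv.2).getD "verdict" "") 3
      if p < best then p else best) 3
  if best < 3 then ((PySem.List.pyGet? names best).getD "no_signal") else "no_signal"

-- ===== PRECONDITION & SPEC =====
-- Pre_ excludes exactly the inputs where some report lacks the "verdict" key: there Python A raises KeyError (and so does B).
def Pre_combine_verdict (source_reports : List (String × List (String × String))) : Prop :=
  ∀ kv ∈ source_reports, (PySem.Dict.mk kv.2).contains "verdict" = true
instance (source_reports : List (String × List (String × String))) : Decidable (Pre_combine_verdict source_reports) := by unfold Pre_combine_verdict; infer_instance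
def pvWitness_combine_verdict : (List (String × List (String × String))) :=
  [("src1", [("verdict", "inspect")]), ("src2", [("verdict", "continue")])]

def Spec_combine_verdict (source_reports : List (String × List (String × String))) (out : String) : Prop := out = combine_verdict_alt source_reports
instance (source_reports : List (String × List (String × String))) (out : String) : Decidable (Spec_combine_verdict source_reports out) := by unfold Spec_combine_verdict; infer_instance

-- ===== CLAIM (what is proved, stated in full; the proofs are below) =====
def Claim_equal_combine_verdict : Prop := ∀ (source_reports : List (String × List (String × String))), Dom_combine_verdict source_reports → Pre_combine_verdict source_reports → Spec_combine_verdict source_reports (combine_verdict source_reports)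

-- ===== LEMMAS AND PROOFS =====

-- B's priority-table lookup, as a standalone function of the verdict string
def prio (v : String) : Int :=
  (PySem.Dict.mk [("stop_or_revert", (0:Int)), ("inspect", 1), ("continue", 2)]).getD v 3

lemma prio_eq (v : String) :
    prio v = if v = "stop_or_revert" then 0 else if v = "inspect" then 1
             else if v = "continue" then 2 else 3 := by
  simp only [prio, PySem.Dict.getD_eq_get?_getD, PySem.Dict.get?_mk_cons, beq_iff_eq]
  by_cases h1 : v = "stop_or_revert" <;> by_cases h2 : v = "inspect" <;>
    by_cases h3 : v = "continue" <;>
    simp [h1, h2, h3, eq_comm, PySem.Dict.get?]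

lemma prio_le_three (v : String) : prio v ≤ 3 := by
  rw [prio_eq]; split_ifs <;> norm_num

-- A's three ordered membership scans, as a function of the verdicts list
def hmin (vs : List String) : Int :=
  if vs.contains "stop_or_revert" then 0
  else if vs.contains "inspect" then 1
  else if vs.contains "continue" then 2 else 3

lemma hmin_le_three (vs : List String) : hmin vs ≤ 3 := by
  unfold hmin; split_ifs <;> norm_num

lemma hmin_cons (v : String) (vs : List String) :
    hmin (v :: vs) = min (prio v) (hmin vs) := by
  rw [prio_eq]
  unfold hmin
  simp only [List.contains_cons, Bool.or_eq_true, beq_iff_eq]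
  by_cases h1 : v = "stop_or_revert" <;> by_cases h2 : v = "inspect" <;>
    by_cases h3 : v = "continue" <;>
    by_cases c1 : "stop_or_revert" ∈ vs <;>
    by_cases c2 : "inspect" ∈ vs <;>
    by_cases c3 : "continue" ∈ vs <;>
    simp [h1, h2, h3, c1, c2, c3, eq_comm]

-- B's one-pass fold computes exactly hmin when started at any bound ≥ every priority
lemma fold_eq_hmin (vs : List String) :
    ∀ b : Int, b ≤ 3 →
      vs.foldl (fun best v => if prio v < best then prio v else best) b = min b (hmin vs) := by
  induction vs with
  | nil =>
    intro b hb
    have h : hmin ([] : List String) = 3 := by unfold hmin; simp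
    simp only [List.foldl_nil, h]
    omega
  | cons v vs ih =>
    intro b hb
    simp only [List.foldl_cons]
    have hstep : (if prio v < b then prio v else b) = min (prio v) b := by
      split_ifs <;> omega
    rw [hstep, ih (min (prio v) b) (by have := prio_le_three v; omega), hmin_cons]
    omega

-- B's result, expressed through hmin of the verdicts list
lemma alt_eq_hmin (sr : List (String × List (String × String))) :
    combine_verdict_alt sr =
      (if hmin (sr.map (fun kv => (PySem.Dict.mk kv.2).getD "verdict" "")) < 3
       then ((PySem.List.pyGet? ["stop_or_revert", "inspect", "continue"]
               (hmin (sr.map (fun kv => (PySem.Dict.mk kv.2).getD "verdict" "")))).getD "no_signal")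
       else "no_signal") := by
  have key := fold_eq_hmin (sr.map (fun kv => (PySem.Dict.mk kv.2).getD "verdict" "")) 3 (le_refl 3)
  rw [List.foldl_map, min_eq_right (hmin_le_three _)] at key
  simp only [prio] at key
  unfold combine_verdict_alt
  simp only [key]

-- ===== VERDICT (by name: the statement is the Claim_ definition above) =====
theorem combine_verdict_spec : Claim_equal_combine_verdict := by
  intro sr _ _
  show combine_verdict sr = combine_verdict_alt sr
  rw [alt_eq_hmin]
  unfold combine_verdict hmin
  simp only []
  split_ifs <;> first | rfl | omega
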